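-- pv_equiv track=rewrite | github.com/marcfawaz/fred | knowledge-flow-backend/knowledge_flow_backend/features/filesystem/virtual_fs_contract.py | normalize_virtual_path
-- ===== SOURCE A (Python) =====
-- import posixpath
--
-- def normalize_virtual_path(path: str) -> str:
--     """
--     Normalize one visible virtual filesystem path.
--
--     Why this exists:
--     - all filesystem callers should share one path grammar
--     - normalization rejects traversal while keeping POSIX-style segments
--
--     How to use:
--     - pass any user-visible path
--     - the result never starts with `/` and contains no `..` segments
--
--     Example:
--     - `normalize_virtual_path("/workspace/./notes")` returns `"workspace/notes"`
--     """
--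
--     raw = (path or "").strip().replace("\\", "/").lstrip("/")
--     if not raw:
--         return ""
--     normalized = posixpath.normpath(raw)
--     if normalized in (".", "/"):
--         return ""
--     parts = [seg for seg in normalized.split("/") if seg]
--     if any(seg == ".." for seg in parts):
--         raise ValueError("Path cannot contain parent path segments")
--     return "/".join(parts)
-- ===== SOURCE B (Python) =====
-- def normalize_virtual_path(path: str) -> str:
--     raw = (path or "").strip().replace("\\", "/").lstrip("/")
--     if not raw:
--         return ""
--     stack = []
--     for seg in raw.split("/"):
--         if seg in ("", "."):
--             continue
--         if seg == "..":
--             if stack and stack[-1] != "..":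
--                 stack.pop()
--             else:
--                 stack.append(seg)
--         else:
--             stack.append(seg)
--     if ".." in stack:
--         raise ValueError("Path cannot contain parent path segments")
--     return "/".join(stack)
-- ===== Notes on version B (the rewrite author's own statement) =====
-- stated objective: idiomatic
-- what changed: B drops the posixpath.normpath round-trip (normalize, test for '.'/'/', re-split, re-filter, re-join) and instead walks the raw split segments once with an explicit stack (skip ''/'.' , cancel '..' against a non-'..' top, else push), raising on any surviving '..' and joining the stack.
import Mathlib
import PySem

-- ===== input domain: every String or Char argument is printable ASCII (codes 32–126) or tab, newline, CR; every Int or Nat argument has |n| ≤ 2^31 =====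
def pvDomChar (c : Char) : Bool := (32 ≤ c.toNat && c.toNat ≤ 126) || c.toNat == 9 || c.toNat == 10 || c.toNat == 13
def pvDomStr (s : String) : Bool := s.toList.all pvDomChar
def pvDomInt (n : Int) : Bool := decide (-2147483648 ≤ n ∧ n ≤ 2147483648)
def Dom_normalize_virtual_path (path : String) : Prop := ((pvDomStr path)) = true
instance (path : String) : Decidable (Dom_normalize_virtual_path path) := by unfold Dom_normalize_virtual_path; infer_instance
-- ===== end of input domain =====

-- B replaces the posixpath.normpath round-trip (normalize, re-split, re-filter, re-join) by one
-- explicit segment stack walked over the raw split; objective: idiomatic, no speed claim.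

-- ===== PORT A =====
-- transliteration of posixpath.normpath (CPython's pure-Python version) on List Char
def pvNormpath (path : List Char) : List Char :=
  if path = [] then ['.']
  else
    let initialSlashes : Nat :=
      if PySem.Chars.startswith path ['/'] then
        if PySem.Chars.startswith path ['/', '/'] ∧ ¬ PySem.Chars.startswith path ['/', '/', '/'] then 2 else 1
      else 0
    let comps := PySem.Chars.splitOn path ['/']
    let newComps := comps.foldl (fun acc comp =>
      if comp = [] ∨ comp = ['.'] then acc
      else if comp ≠ ['.', '.'] ∨ (initialSlashes = 0 ∧ acc = []) ∨ (acc ≠ [] ∧ acc.getLast? = some ['.', '.']) then acc ++ [comp]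
      else if acc ≠ [] then acc.dropLast
      else acc) []
    let joined := List.replicate initialSlashes '/' ++ PySem.Chars.join ['/'] newComps
    if joined = [] then ['.'] else joined

def normalize_virtual_path (path : String) : String :=
  -- (path or "") = path on strings; .lstrip("/") is exactly dropWhile (· == '/')
  let raw := List.dropWhile (· == '/') (PySem.Chars.replace (PySem.Chars.strip path.toList) ['\\'] ['/'])
  if raw = [] then ""
  else
    let normalized := pvNormpath raw
    if normalized = ['.'] ∨ normalized = ['/'] then ""
    else
      let parts := (PySem.Chars.splitOn normalized ['/']).filter (fun seg => !seg.isEmpty)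
      if parts.any (fun seg => seg == ['.', '.']) then ""  -- raise ValueError: excluded by Pre_
      else String.ofList (PySem.Chars.join ['/'] parts)

-- ===== PORT B =====
def normalize_virtual_path_alt (path : String) : String :=
  let raw := List.dropWhile (· == '/') (PySem.Chars.replace (PySem.Chars.strip path.toList) ['\\'] ['/'])
  if raw = [] then ""
  else
    let stack := (PySem.Chars.splitOn raw ['/']).foldl (fun st seg =>
      if seg = [] ∨ seg = ['.'] then st
      else if seg = ['.', '.'] then
        if st ≠ [] ∧ st.getLast? ≠ some ['.', '.'] then st.dropLast else st ++ [seg]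
      else st ++ [seg]) []
    if stack.any (fun seg => seg == ['.', '.']) then ""  -- raise ValueError: excluded by Pre_
    else String.ofList (PySem.Chars.join ['/'] stack)

-- ===== PRECONDITION & SPEC =====
-- the real (non-empty, non-'.') segments of the cleaned-up input
def pvSegs (path : String) : List (List Char) :=
  (PySem.Chars.splitOn (List.dropWhile (· == '/') (PySem.Chars.replace (PySem.Chars.strip path.toList) ['\\'] ['/'])) ['/']).filter
    (fun s => decide (¬ (s = [] ∨ s = ['.'])))

-- Pre_ excludes exactly the inputs on which A raises ValueError: paths whose '..' segments at some
-- point outnumber the preceding real segments (i.e. the path escapes the root); B raises there too.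
def Pre_normalize_virtual_path (path : String) : Prop :=
  ∀ i ≤ (pvSegs path).length,
    ((pvSegs path).take i).count ['.', '.'] ≤ (((pvSegs path).take i).filter (fun s => decide (s ≠ ['.', '.']))).length

instance (path : String) : Decidable (Pre_normalize_virtual_path path) := by
  unfold Pre_normalize_virtual_path; infer_instance

def pvWitness_normalize_virtual_path : String := "/workspace/./notes"

def Spec_normalize_virtual_path (path : String) (out : String) : Prop := out = normalize_virtual_path_alt path
instance (path : String) (out : String) : Decidable (Spec_normalize_virtual_path path out) := by unfold Spec_normalize_virtual_path; infer_instance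

-- ===== CLAIM (what is proved, stated in full; the proofs are below) =====
def Claim_equal_normalize_virtual_path : Prop := ∀ (path : String), Dom_normalize_virtual_path path → Pre_normalize_virtual_path path → Spec_normalize_virtual_path path (normalize_virtual_path path)

-- ===== LEMMAS AND PROOFS =====

-- the real step of B's stack walk (skips already filtered out); proof-side helper
def pvStep (st : List (List Char)) (seg : List Char) : List (List Char) :=
  if seg = ['.', '.'] then
    if st ≠ [] ∧ st.getLast? ≠ some ['.', '.'] then st.dropLast else st ++ [seg]
  else st ++ [seg]

-- PySem's splitOn with the one-character separator '/' is Mathlib's List.splitOn '/'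
lemma pv_go_spec (l : List Char) : ∀ (fuel : Nat) (cur : List Char) (acc : List (List Char)),
    l.length < fuel →
    PySem.Chars.splitOn.go ['/'] fuel l cur acc
      = acc.reverse ++ (l.splitOn '/').modifyHead (cur.reverse ++ ·) := by
  induction l with
  | nil =>
    intro fuel cur acc h
    cases fuel with
    | zero => omega
    | succ f =>
      simp [PySem.Chars.splitOn.go, List.splitOn, List.splitOnP_nil, List.modifyHead]
  | cons c rest ih =>
    intro fuel cur acc h
    cases fuel with
    | zero => omega
    | succ f =>
      by_cases hc : c = '/'
      · have hpre : List.isPrefixOf ['/'] (c :: rest) = true := by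
          simp [List.isPrefixOf, hc]
        have hgo : PySem.Chars.splitOn.go ['/'] (f + 1) (c :: rest) cur acc
            = PySem.Chars.splitOn.go ['/'] f (List.drop 1 (c :: rest)) [] (cur.reverse :: acc) := by
          simp [PySem.Chars.splitOn.go, hpre]
        rw [hgo]
        simp only [List.drop_succ_cons, List.drop_zero]
        rw [ih f [] (cur.reverse :: acc) (by simpa using h)]
        rw [show (c :: rest).splitOn '/' = [] :: rest.splitOn '/' from by
          simp [List.splitOn, List.splitOnP_cons, hc]]
        cases rest.splitOn '/' <;> simp [List.modifyHead]
      · have hcb : (('/' : Char) == c) = false := beq_eq_false_iff_ne.2 (fun h => hc h.symm)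
        have hpre : List.isPrefixOf ['/'] (c :: rest) = false := by
          simp [List.isPrefixOf, hcb]
        have hgo : PySem.Chars.splitOn.go ['/'] (f + 1) (c :: rest) cur acc
            = PySem.Chars.splitOn.go ['/'] f rest (c :: cur) acc := by
          simp [PySem.Chars.splitOn.go, hpre]
        rw [hgo, ih f (c :: cur) acc (by simpa using h)]
        rw [show (c :: rest).splitOn '/' = (rest.splitOn '/').modifyHead (c :: ·) from by
          simp [List.splitOn, List.splitOnP_cons, hc]]
        cases hr : rest.splitOn '/' with
        | nil => exact absurd hr (by simp [List.splitOn]; exact List.splitOnP_ne_nil _ rest)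
        | cons hd tl => simp [List.modifyHead]

lemma pv_splitOn_eq (s : List Char) : PySem.Chars.splitOn s ['/'] = s.splitOn '/' := by
  have h := pv_go_spec s (s.length + 1) [] [] (by omega)
  simp only [PySem.Chars.splitOn]
  rw [h]
  cases s.splitOn '/' <;> simp [List.modifyHead]

lemma pv_no_sep (s : List Char) : ∀ x ∈ s.splitOn '/', '/' ∉ x := by
  induction s with
  | nil =>
    intro x hx
    simp [List.splitOn, List.splitOnP_nil] at hx
    simp [hx]
  | cons c rest ih =>
    intro x hx
    by_cases hc : c = '/'
    · rw [show (c :: rest).splitOn '/' = [] :: rest.splitOn '/' from by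
        simp [List.splitOn, List.splitOnP_cons, hc]] at hx
      rcases List.mem_cons.1 hx with hx | hx
      · simp [hx]
      · exact ih x hx
    · rw [show (c :: rest).splitOn '/' = (rest.splitOn '/').modifyHead (c :: ·) from by
        simp [List.splitOn, List.splitOnP_cons, hc]] at hx
      cases hr : rest.splitOn '/' with
      | nil => exact absurd hr (by simp [List.splitOn]; exact List.splitOnP_ne_nil _ rest)
      | cons hd tl =>
        rw [hr] at hx
        simp only [List.modifyHead, List.mem_cons] at hx
        rcases hx with hx | hx
        · subst hx
          intro hmem
          rcases List.mem_cons.1 hmem with h1 | h1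
          · exact hc h1.symm
          · exact ih hd (by simp [hr]) h1
        · exact ih x (by simp [hr, hx])

lemma pv_nostartswith (s : List Char) :
    PySem.Chars.startswith (List.dropWhile (· == '/') s) ['/'] = false := by
  induction s with
  | nil => simp [PySem.Chars.startswith]
  | cons a s ih =>
    by_cases ha : a = '/'
    · simpa [List.dropWhile_cons, ha] using ih
    · have hba : (('/' : Char) == a) = false := beq_eq_false_iff_ne.2 (fun h => ha h.symm)
      simp [ha, PySem.Chars.startswith, List.isPrefixOf, hba]

-- A's normpath loop (with no initial slashes) and B's stack loop take the same step
lemma pv_step_eq (acc : List (List Char)) (comp : List Char) :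
    (if comp = [] ∨ comp = ['.'] then acc
     else if comp ≠ ['.', '.'] ∨ (True ∧ acc = []) ∨ (acc ≠ [] ∧ acc.getLast? = some ['.', '.']) then acc ++ [comp]
     else if acc ≠ [] then acc.dropLast
     else acc)
    = (if comp = [] ∨ comp = ['.'] then acc
       else if comp = ['.', '.'] then
         if acc ≠ [] ∧ acc.getLast? ≠ some ['.', '.'] then acc.dropLast else acc ++ [comp]
       else acc ++ [comp]) := by
  split_ifs <;> first | rfl | tauto

-- on input with no leading '/', pvNormpath is exactly B's stack walk (joined, '' rendered as '.')
lemma pv_normpath_spec (p : List Char) (hp : p ≠ [])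
    (hs : PySem.Chars.startswith p ['/'] = false) :
    pvNormpath p =
      (if PySem.Chars.join ['/'] ((PySem.Chars.splitOn p ['/']).foldl (fun st seg =>
          if seg = [] ∨ seg = ['.'] then st
          else if seg = ['.', '.'] then
            if st ≠ [] ∧ st.getLast? ≠ some ['.', '.'] then st.dropLast else st ++ [seg]
          else st ++ [seg]) []) = [] then ['.']
       else PySem.Chars.join ['/'] ((PySem.Chars.splitOn p ['/']).foldl (fun st seg =>
          if seg = [] ∨ seg = ['.'] then st
          else if seg = ['.', '.'] then
            if st ≠ [] ∧ st.getLast? ≠ some ['.', '.'] then st.dropLast else st ++ [seg]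
          else st ++ [seg]) [])) := by
  unfold pvNormpath
  rw [if_neg hp]
  simp only [hs, Bool.false_eq_true, if_false, List.replicate_zero, List.nil_append]
  rw [show (fun (acc : List (List Char)) (comp : List Char) =>
      if comp = [] ∨ comp = ['.'] then acc
      else if comp ≠ ['.', '.'] ∨ (True ∧ acc = []) ∨ (acc ≠ [] ∧ acc.getLast? = some ['.', '.']) then acc ++ [comp]
      else if acc ≠ [] then acc.dropLast
      else acc)
    = (fun (st : List (List Char)) (seg : List Char) =>
      if seg = [] ∨ seg = ['.'] then st
      else if seg = ['.', '.'] then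
        if st ≠ [] ∧ st.getLast? ≠ some ['.', '.'] then st.dropLast else st ++ [seg]
      else st ++ [seg]) from funext fun acc => funext fun comp => pv_step_eq acc comp]

-- loop invariant of the stack walk: under the prefix-count bound no '..' survives and
-- every stack element is a real, slash-free segment
lemma pv_inv : ∀ (segs stack : List (List Char)),
    (∀ x ∈ segs, x ≠ [] ∧ x ≠ ['.'] ∧ '/' ∉ x) →
    (∀ x ∈ stack, x ≠ [] ∧ x ≠ ['.'] ∧ '/' ∉ x) →
    ['.', '.'] ∉ stack →
    (∀ i ≤ segs.length, (segs.take i).count ['.', '.']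
        ≤ ((segs.take i).filter (fun s => decide (s ≠ ['.', '.']))).length + stack.length) →
    (∀ x ∈ segs.foldl pvStep stack, x ≠ [] ∧ x ≠ ['.'] ∧ '/' ∉ x)
      ∧ ['.', '.'] ∉ segs.foldl pvStep stack := by
  intro segs
  induction segs with
  | nil => intro stack _ hs hnd _; exact ⟨hs, hnd⟩
  | cons seg rest ih =>
    intro stack hg hs hnd hpre
    have hseg := hg seg (by simp)
    simp only [List.foldl_cons]
    by_cases hdd : seg = ['.', '.']
    · have h1 := hpre 1 (by simp)
      rw [hdd] at h1
      simp at h1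
      have hne : stack ≠ [] := by
        intro h0; rw [h0] at h1; simp at h1
      have hlast : stack.getLast? ≠ some ['.', '.'] := by
        intro hx
        exact hnd (List.mem_of_getLast? hx)
      have hstep : pvStep stack seg = stack.dropLast := by
        simp [pvStep, hdd, hne, hlast]
      rw [hstep]
      refine ih stack.dropLast (fun x hx => hg x (by simp [hx]))
        (fun x hx => hs x (stack.dropLast_sublist.subset hx))
        (fun hx => hnd (stack.dropLast_sublist.subset hx)) ?_
      intro i hi
      have h2 := hpre (i + 1) (by simp; omega)
      rw [hdd] at h2
      simp only [List.take_succ_cons] at h2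
      have hpos : 0 < stack.length := List.length_pos_iff.2 hne
      simp at h2 ⊢
      omega
    · have hstep : pvStep stack seg = stack ++ [seg] := by
        simp [pvStep, hdd]
      rw [hstep]
      refine ih (stack ++ [seg]) (fun x hx => hg x (by simp [hx]))
        (fun x hx => by
          rcases List.mem_append.1 hx with h | h
          · exact hs x h
          · simp at h; subst h; exact hseg)
        (by
          intro hx
          rcases List.mem_append.1 hx with h | h
          · exact hnd h
          · simp at h; exact hdd h.symm) ?_
      intro i hi
      have h2 := hpre (i + 1) (by simp; omega)
      simp only [List.take_succ_cons] at h2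
      rw [List.count_cons_of_ne hdd] at h2
      simp [hdd] at h2 ⊢
      omega

-- the heart of the equivalence, on an arbitrary input satisfying Pre_
lemma pv_main (path : String) (hpre : Pre_normalize_virtual_path path) :
    normalize_virtual_path path = normalize_virtual_path_alt path := by
  unfold Pre_normalize_virtual_path pvSegs at hpre
  simp only [normalize_virtual_path, normalize_virtual_path_alt]
  set raw := List.dropWhile (· == '/') (PySem.Chars.replace (PySem.Chars.strip path.toList) ['\\'] ['/']) with hraw
  by_cases hr : raw = []
  · simp [hr]
  · simp only [if_neg hr]
    have hstart : PySem.Chars.startswith raw ['/'] = false := pv_nostartswith _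
    set comps := PySem.Chars.splitOn raw ['/'] with hcomps
    set stack := comps.foldl (fun st seg =>
          if seg = [] ∨ seg = ['.'] then st
          else if seg = ['.', '.'] then
            if st ≠ [] ∧ st.getLast? ≠ some ['.', '.'] then st.dropLast else st ++ [seg]
          else st ++ [seg]) [] with hstack
    -- reduce B's fold to pvStep over the filtered segments
    have hBfilter : stack
        = (comps.filter (fun s => decide (¬ (s = [] ∨ s = ['.'])))).foldl pvStep [] := by
      rw [hstack]
      have h1 : (fun (st : List (List Char)) (seg : List Char) =>
            if seg = [] ∨ seg = ['.'] then st
            else if seg = ['.', '.'] then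
              if st ≠ [] ∧ st.getLast? ≠ some ['.', '.'] then st.dropLast else st ++ [seg]
            else st ++ [seg])
          = (fun st seg => if ¬ (seg = [] ∨ seg = ['.']) then pvStep st seg else st) := by
        funext st seg
        by_cases h : seg = [] ∨ seg = ['.'] <;> simp [h, pvStep]
      rw [h1, PySem.List.foldl_ite_eq_foldl_filter]
    -- invariant: no '..' on the stack, all elements real and slash-free
    have hinv := pv_inv (comps.filter (fun s => decide (¬ (s = [] ∨ s = ['.'])))) []
      (fun x hx => by
        have hm := List.mem_of_mem_filter hx
        have hp := List.of_mem_filter hx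
        simp at hp
        refine ⟨hp.1, hp.2, ?_⟩
        rw [hcomps, pv_splitOn_eq] at hm
        exact pv_no_sep raw x hm)
      (by simp) (by simp)
      (by intro i hi; simpa using hpre i hi)
    rw [← hBfilter] at hinv
    obtain ⟨hgoodS, -⟩ := hinv
    rw [pv_normpath_spec raw hr hstart, ← hcomps, ← hstack]
    by_cases hs0 : stack = []
    · simp [hs0]
    · have hJdef : PySem.Chars.join ['/'] stack = ['/'].intercalate stack := rfl
      set J := PySem.Chars.join ['/'] stack with hJ
      have hsp : J.splitOn '/' = stack :=
        List.splitOn_intercalate _ '/' (fun l hl => (hgoodS l hl).2.2) hs0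
      have hJne : J ≠ [] := by
        intro h; rw [h] at hsp
        have h2 : stack = [[]] := by rw [← hsp]; decide
        exact (hgoodS [] (by simp [h2])).1 rfl
      have hJdot : J ≠ ['.'] := by
        intro h; rw [h] at hsp
        have h2 : stack = [['.']] := by rw [← hsp]; decide
        exact (hgoodS ['.'] (by simp [h2])).2.1 rfl
      have hJslash : J ≠ ['/'] := by
        intro h; rw [h] at hsp
        have h2 : stack = [[], []] := by rw [← hsp]; decide
        exact (hgoodS [] (by simp [h2])).1 rfl
      rw [if_neg hJne]
      rw [if_neg (show ¬ (J = ['.'] ∨ J = ['/']) from not_or.2 ⟨hJdot, hJslash⟩)]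
      have hparts : (PySem.Chars.splitOn J ['/']).filter (fun seg => !seg.isEmpty) = stack := by
        rw [pv_splitOn_eq, hsp]
        apply List.filter_eq_self.2
        intro x hx
        simp [(hgoodS x hx).1]
      rw [hparts]

-- ===== VERDICT (by name: the statement is the Claim_ definition above) =====
theorem normalize_virtual_path_spec : Claim_equal_normalize_virtual_path := by
  intro path _ hpre
  exact pv_main path hpre
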